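-- pv_equiv track=rewrite | github.com/De-Par/yolo-training-pipeline | tools/filter_yolo_dataset_classes.py | parse_csv_tokens
-- ===== SOURCE A (Python) =====
-- from typing import Dict, List, Set
--
-- def parse_csv_tokens(values: List[str] | None) -> List[str]:
--     if not values:
--         return []
--     out: List[str] = []
--     for value in values:
--         for token in str(value).split(","):
--             t = token.strip()
--             if t:
--                 out.append(t)
--     return out
-- ===== SOURCE B (Python) =====
-- from typing import List
--
--
-- def parse_csv_tokens(values: "List[str] | None") -> "List[str]":
--     # Character-level state machine: one scan per string, no split/strip/join.
--     if not values:
--         return []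
--     out: List[str] = []
--     for value in values:
--         buf: List[str] = []   # current token, left-trimmed, ends in a non-space char
--         ws: List[str] = []    # pending interior whitespace since last non-space char
--         for ch in str(value):
--             if ch == ',':
--                 if buf:
--                     out.append(''.join(buf))
--                 buf = []
--                 ws = []
--             elif ch.isspace():
--                 if buf:
--                     ws.append(ch)
--             else:
--                 buf.extend(ws)
--                 buf.append(ch)
--                 ws = []
--         if buf:
--             out.append(''.join(buf))
--     return out
-- ===== Notes on version B (the rewrite author's own statement) =====
-- stated objective: alternative
-- what changed: B replaces A's split-on-comma / strip / filter pipeline by a single character-level state machine that scans each string once, maintaining a token buffer and a pending-whitespace buffer, emitting tokens at commas and end of string.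
import Mathlib
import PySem

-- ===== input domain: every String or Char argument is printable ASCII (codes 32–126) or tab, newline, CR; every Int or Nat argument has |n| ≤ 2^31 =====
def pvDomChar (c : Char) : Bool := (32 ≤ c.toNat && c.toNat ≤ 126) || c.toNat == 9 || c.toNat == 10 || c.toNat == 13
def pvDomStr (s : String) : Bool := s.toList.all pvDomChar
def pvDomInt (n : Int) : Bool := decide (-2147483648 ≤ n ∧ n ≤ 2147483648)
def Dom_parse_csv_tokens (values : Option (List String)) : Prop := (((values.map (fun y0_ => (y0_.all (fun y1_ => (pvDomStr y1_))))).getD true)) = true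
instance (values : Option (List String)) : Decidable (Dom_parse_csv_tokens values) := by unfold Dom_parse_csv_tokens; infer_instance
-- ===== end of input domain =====

-- B replaces A's split/strip/filter pipeline by a character-level state machine scanning each string once; same cost, different algorithm.

-- ===== PORT A =====
-- value.split(",") with the literal nonempty separator ','; split? is none only for "" so getD [] is exact here
def parse_csv_tokens (values : Option (List String)) : List String :=
  match values with
  | none => []
  | some vs =>
    if vs = [] then []
    else
      vs.foldl (fun out value =>
        ((PySem.Str.split? value ",").getD []).foldl (fun out token =>
          let t := PySem.Str.strip token
          if t ≠ "" then out ++ [t] else out) out) []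

-- ===== PORT B =====
-- the inner character loop of Source B: buf = current token chars, ws = pending whitespace, out = emitted tokens
def pvDfa : List Char → List Char → List Char → List String → List String
  | [], buf, _, out => if buf = [] then out else out ++ [String.ofList buf]
  | c :: s, buf, ws, out =>
    if c = ',' then pvDfa s [] [] (if buf = [] then out else out ++ [String.ofList buf])
    else if PySem.Chars.isspace c then pvDfa s buf (if buf = [] then ws else ws ++ [c]) out
    else pvDfa s (buf ++ ws ++ [c]) [] out

def parse_csv_tokens_alt (values : Option (List String)) : List String :=
  match values with
  | none => []
  | some vs =>
    if vs = [] then []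
    else vs.foldl (fun out value => pvDfa value.toList [] [] out) []

-- ===== PRECONDITION & SPEC =====
def Spec_parse_csv_tokens (values : Option (List String)) (out : List String) : Prop := out = parse_csv_tokens_alt values
instance (values : Option (List String)) (out : List String) : Decidable (Spec_parse_csv_tokens values out) := by unfold Spec_parse_csv_tokens; infer_instance

-- ===== CLAIM (what is proved, stated in full; the proofs are below) =====
def Claim_equal_parse_csv_tokens : Prop := ∀ (values : Option (List String)), Dom_parse_csv_tokens values → Spec_parse_csv_tokens values (parse_csv_tokens values)

-- ===== LEMMAS AND PROOFS =====

-- string-level tokens of s.split(",")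
def tokensOf (s : String) : List String := (PySem.Str.split? s ",").getD []

-- pure recursive single-character split on ',' (proof-side model of splitOn s [','])
def csplit : List Char → List (List Char)
  | [] => [[]]
  | c :: rest =>
    if c = ',' then [] :: csplit rest
    else
      match csplit rest with
      | [] => [[c]]
      | h :: t => (c :: h) :: t

def prepFirst (p : List Char) : List (List Char) → List (List Char)
  | [] => []
  | h :: t => (p ++ h) :: t

-- strip / nonempty-filter / pack, applied segment-wise
def clean (segs : List (List Char)) : List String :=
  ((segs.map PySem.Chars.strip).filter (· ≠ [])).map String.ofList

theorem csplit_ne_nil (s : List Char) : csplit s ≠ [] := by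
  cases s with
  | nil => simp [csplit]
  | cons c rest =>
    simp only [csplit]
    split_ifs
    · simp
    · cases h : csplit rest <;> simp

theorem csplit_cons_ne (c : Char) (rest : List Char) (hc : ¬ c = ',') :
    csplit (c :: rest) = prepFirst [c] (csplit rest) := by
  simp only [csplit, if_neg hc]
  cases h : csplit rest with
  | nil => exact absurd h (csplit_ne_nil rest)
  | cons hd tl => simp [prepFirst]

theorem prepFirst_nil (l : List (List Char)) (h : l ≠ []) : prepFirst [] l = l := by
  cases l with
  | nil => simp at h
  | cons hd tl => simp [prepFirst]

theorem prepFirst_prepFirst (a b : List Char) (l : List (List Char)) :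
    prepFirst a (prepFirst b l) = prepFirst (a ++ b) l := by
  cases l with
  | nil => simp [prepFirst]
  | cons hd tl => simp [prepFirst]

theorem go_eq_csplit : ∀ (fuel : Nat) (l cur : List Char) (acc : List (List Char)),
    l.length ≤ fuel →
    PySem.Chars.splitOn.go [','] fuel l cur acc = acc.reverse ++ prepFirst cur.reverse (csplit l) := by
  intro fuel
  induction fuel with
  | zero =>
    intro l cur acc hl
    have : l = [] := List.eq_nil_of_length_eq_zero (Nat.le_zero.mp hl)
    subst this
    simp [PySem.Chars.splitOn.go, csplit, prepFirst]
  | succ n ih =>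
    intro l cur acc hl
    cases l with
    | nil => simp [PySem.Chars.splitOn.go, csplit, prepFirst]
    | cons c rest =>
      rw [PySem.Chars.splitOn.go.eq_def]
      simp only []
      by_cases hc : c = ','
      · subst hc
        have hpre : List.isPrefixOf [','] (',' :: rest) = true := by
          simp [List.isPrefixOf]
        rw [if_pos hpre]
        have hdrop : List.drop (List.length [',']) (',' :: rest) = rest := by simp
        rw [hdrop, ih rest [] (List.reverse cur :: acc) (by simpa using Nat.le_of_succ_le_succ hl)]
        rw [show ([] : List Char).reverse = [] from rfl, prepFirst_nil _ (csplit_ne_nil rest)]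
        simp [csplit, prepFirst]
      · have hpre : List.isPrefixOf [','] (c :: rest) = false := by
          simp [List.isPrefixOf]
          exact fun h => absurd h.symm hc
        rw [if_neg (by simp [hpre])]
        rw [ih rest (c :: cur) acc (by simpa using Nat.le_of_succ_le_succ hl)]
        rw [csplit_cons_ne c rest hc, prepFirst_prepFirst]
        simp

theorem splitOn_comma (s : List Char) : PySem.Chars.splitOn s [','] = csplit s := by
  unfold PySem.Chars.splitOn
  rw [go_eq_csplit (s.length + 1) s [] [] (Nat.le_succ _)]
  simp [prepFirst_nil _ (csplit_ne_nil s)]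

theorem map_toList_tokensOf (s : String) :
    (tokensOf s).map String.toList = csplit s.toList := by
  have h := PySem.Str.split?_map s ","
  have h2 : PySem.Chars.split? s.toList (",").toList
      = some (PySem.Chars.splitOn s.toList [',']) := rfl
  rw [h2] at h
  cases hs : PySem.Str.split? s "," with
  | none => rw [hs] at h; simp at h
  | some l =>
    rw [hs] at h
    simp only [Option.map_some, Option.some.injEq] at h
    unfold tokensOf
    rw [hs]
    simp only [Option.getD_some]
    rw [h, splitOn_comma]

theorem inner_fold (tokens : List String) (acc : List String) :
    tokens.foldl (fun out token =>
        let t := PySem.Str.strip token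
        if t ≠ "" then out ++ [t] else out) acc
    = acc ++ (tokens.filter (fun tok => decide (PySem.Str.strip tok ≠ ""))).map PySem.Str.strip := by
  induction tokens generalizing acc with
  | nil => simp
  | cons hd tl ih =>
    simp only [List.foldl_cons, List.filter_cons]
    by_cases h : PySem.Str.strip hd = ""
    · simp only [h]
      rw [ih]
      simp
    · rw [show (if PySem.Str.strip hd ≠ "" then acc ++ [PySem.Str.strip hd] else acc)
          = acc ++ [PySem.Str.strip hd] by simp [h]]
      rw [ih]
      simp [h]

theorem outer_fold (vs : List String) (acc : List String) :
    vs.foldl (fun out value =>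
      ((PySem.Str.split? value ",").getD []).foldl (fun out token =>
        let t := PySem.Str.strip token
        if t ≠ "" then out ++ [t] else out) out) acc
    = acc ++ vs.flatMap (fun v =>
        ((tokensOf v).filter (fun tok => decide (PySem.Str.strip tok ≠ ""))).map PySem.Str.strip) := by
  induction vs generalizing acc with
  | nil => simp
  | cons v vs' ih =>
    simp only [List.foldl_cons, List.flatMap_cons]
    rw [show ((PySem.Str.split? v ",").getD []) = tokensOf v from rfl]
    rw [inner_fold, ih, List.append_assoc]

-- bridges between String strip and char-level strip
theorem strip_ofList (t : String) :
    PySem.Str.strip t = String.ofList (PySem.Chars.strip t.toList) := by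
  apply String.toList_inj.mp
  simp [PySem.Str.toList_strip]

theorem strip_empty_iff (t : String) :
    PySem.Str.strip t = "" ↔ PySem.Chars.strip t.toList = [] := by
  rw [strip_ofList]
  constructor
  · intro h
    have := congrArg String.toList h
    simpa using this
  · intro h
    rw [h]

theorem clean_nil : clean [] = [] := rfl

theorem clean_cons (h : List Char) (t : List (List Char)) :
    clean (h :: t) = (if PySem.Chars.strip h = [] then [] else [String.ofList (PySem.Chars.strip h)]) ++ clean t := by
  unfold clean
  simp only [List.map_cons, List.filter_cons]
  split_ifs <;> simp_all

theorem a_value_list (ts : List String) :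
    (ts.filter (fun tok => decide (PySem.Str.strip tok ≠ ""))).map PySem.Str.strip
    = clean (ts.map String.toList) := by
  induction ts with
  | nil => rfl
  | cons t rest ih =>
    rw [List.map_cons, clean_cons]
    by_cases h : PySem.Chars.strip t.toList = []
    · have h' : PySem.Str.strip t = "" := (strip_empty_iff t).mpr h
      have hd : List.filter (fun tok => decide (PySem.Str.strip tok ≠ "")) (t :: rest)
          = List.filter (fun tok => decide (PySem.Str.strip tok ≠ "")) rest := by
        simp [h']
      rw [if_pos h, hd, ih, List.nil_append]
    · have h' : PySem.Str.strip t ≠ "" := fun hh => h ((strip_empty_iff t).mp hh)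
      have hd : List.filter (fun tok => decide (PySem.Str.strip tok ≠ "")) (t :: rest)
          = t :: List.filter (fun tok => decide (PySem.Str.strip tok ≠ "")) rest := by
        simp [h']
      rw [if_neg h, hd, List.map_cons, ih, strip_ofList t, List.singleton_append]

-- A's per-value result equals char-level clean of csplit
theorem a_value (v : String) :
    ((tokensOf v).filter (fun tok => decide (PySem.Str.strip tok ≠ ""))).map PySem.Str.strip
    = clean (csplit v.toList) := by
  rw [← map_toList_tokensOf]
  exact a_value_list _

-- invariant of the state machine: ws is all whitespace; buf is empty (with ws empty)
-- or nonempty with non-whitespace first and last characters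
def Good (buf ws : List Char) : Prop :=
  ws.all PySem.Chars.isspace = true ∧
  ((buf = [] ∧ ws = []) ∨
   (buf ≠ [] ∧ List.dropWhile PySem.Chars.isspace buf = buf ∧
    List.dropWhile PySem.Chars.isspace buf.reverse = buf.reverse))

theorem strip_state (buf ws : List Char) (h : Good buf ws) :
    PySem.Chars.strip (buf ++ ws) = buf := by
  obtain ⟨hws, hcase⟩ := h
  rcases hcase with ⟨hb, hw⟩ | ⟨hb, hl, hr⟩
  · subst hb; subst hw; rfl
  · have hbne : ¬ (List.dropWhile PySem.Chars.isspace buf).isEmpty = true := by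
      rw [hl]; simpa using hb
    unfold PySem.Chars.strip PySem.Chars.lstrip PySem.Chars.rstrip
    rw [List.dropWhile_append, if_neg hbne, hl]
    rw [List.reverse_append, List.dropWhile_append]
    have hwsrev : List.dropWhile PySem.Chars.isspace ws.reverse = [] := by
      rw [List.dropWhile_eq_nil_iff]
      intro c hc
      exact (List.all_eq_true.mp hws) c (List.mem_reverse.mp hc)
    rw [hwsrev]
    simp [hr]

theorem strip_cons_space (c : Char) (hc : PySem.Chars.isspace c = true) (l : List Char) :
    PySem.Chars.strip (c :: l) = PySem.Chars.strip l := by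
  unfold PySem.Chars.strip PySem.Chars.lstrip
  rw [List.dropWhile_cons_of_pos hc]

theorem clean_prepspace (c : Char) (hc : PySem.Chars.isspace c = true)
    (l : List (List Char)) (hl : l ≠ []) :
    clean (prepFirst [c] l) = clean l := by
  cases l with
  | nil => exact absurd rfl hl
  | cons h t =>
    rw [show prepFirst [c] (h :: t) = (c :: h) :: t from rfl]
    rw [clean_cons, clean_cons, strip_cons_space c hc]

theorem good_push (buf ws : List Char) (c : Char) (h : Good buf ws)
    (hc : PySem.Chars.isspace c = false) : Good (buf ++ ws ++ [c]) [] := by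
  obtain ⟨hws, hcase⟩ := h
  have hcc : ¬ PySem.Chars.isspace c = true := by simp [hc]
  refine ⟨rfl, Or.inr ⟨by simp, ?_, ?_⟩⟩
  · rcases hcase with ⟨hb, hw⟩ | ⟨hb, hl, hr⟩
    · subst hb; subst hw
      simp only [List.nil_append]
      exact List.dropWhile_cons_of_neg hcc
    · cases buf with
      | nil => exact absurd rfl hb
      | cons b bs =>
        have hbns : ¬ PySem.Chars.isspace b = true := by
          intro hsp
          rw [List.dropWhile_cons_of_pos hsp] at hl
          have h1 := List.length_dropWhile_le PySem.Chars.isspace bs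
          have h2 := congrArg List.length hl
          simp at h2
          omega
        rw [show (b :: bs ++ ws ++ [c]) = b :: (bs ++ ws ++ [c]) by simp]
        exact List.dropWhile_cons_of_neg hbns
  · rw [show (buf ++ ws ++ [c]).reverse = c :: (ws.reverse ++ buf.reverse) by simp]
    exact List.dropWhile_cons_of_neg hcc

-- simp-free equation lemmas for the state machine and the splitter
theorem pvDfa_nil (buf ws : List Char) (out : List String) :
    pvDfa [] buf ws out = if buf = [] then out else out ++ [String.ofList buf] := rfl

theorem pvDfa_cons (c : Char) (s buf ws : List Char) (out : List String) :
    pvDfa (c :: s) buf ws out =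
      if c = ',' then pvDfa s [] [] (if buf = [] then out else out ++ [String.ofList buf])
      else if PySem.Chars.isspace c then pvDfa s buf (if buf = [] then ws else ws ++ [c]) out
      else pvDfa s (buf ++ ws ++ [c]) [] out := rfl

theorem csplit_nil : csplit [] = [[]] := rfl

theorem csplit_comma (rest : List Char) : csplit (',' :: rest) = [] :: csplit rest := by
  simp [csplit]

theorem prepFirst_cons (p h : List Char) (t : List (List Char)) :
    prepFirst p (h :: t) = (p ++ h) :: t := rfl

theorem dfa_spec : ∀ (s buf ws : List Char) (out : List String), Good buf ws →
    pvDfa s buf ws out = out ++ clean (prepFirst (buf ++ ws) (csplit s)) := by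
  intro s
  induction s with
  | nil =>
    intro buf ws out h
    rw [pvDfa_nil, csplit_nil, prepFirst_cons]
    simp only [List.append_nil]
    rw [clean_cons, strip_state buf ws h, clean_nil]
    rcases h.2 with ⟨hb, _⟩ | ⟨hb, _, _⟩
    · simp [hb]
    · simp [hb]
  | cons c s ih =>
    intro buf ws out h
    rw [pvDfa_cons]
    by_cases hc : c = ','
    · subst hc
      rw [if_pos rfl, ih [] [] _ ⟨rfl, Or.inl ⟨rfl, rfl⟩⟩, csplit_comma, prepFirst_cons]
      simp only [List.append_nil]
      rw [prepFirst_nil _ (csplit_ne_nil s), clean_cons, strip_state buf ws h]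
      rcases h.2 with ⟨hb, _⟩ | ⟨hb, _, _⟩
      · simp [hb]
      · simp [hb, List.append_assoc]
    · rw [if_neg hc, csplit_cons_ne c s hc, prepFirst_prepFirst]
      by_cases hsp : PySem.Chars.isspace c = true
      · rw [if_pos hsp]
        rcases h.2 with ⟨hb, hw⟩ | ⟨hb, hl, hr⟩
        · subst hb; subst hw
          rw [if_pos rfl, ih [] [] out ⟨rfl, Or.inl ⟨rfl, rfl⟩⟩]
          simp only [List.nil_append, List.append_nil]
          rw [prepFirst_nil _ (csplit_ne_nil s), clean_prepspace c hsp _ (csplit_ne_nil s)]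
        · have hg : Good buf (ws ++ [c]) := ⟨by simp [h.1, hsp], Or.inr ⟨hb, hl, hr⟩⟩
          rw [if_neg hb, ih buf (ws ++ [c]) out hg,
              show buf ++ (ws ++ [c]) = buf ++ ws ++ [c] from by simp]
      · rw [if_neg hsp, ih (buf ++ ws ++ [c]) [] out (good_push buf ws c h (by simpa using hsp)),
            List.append_nil]

theorem outer_alt (vs : List String) (out : List String) :
    vs.foldl (fun o v => pvDfa v.toList [] [] o) out
    = out ++ vs.flatMap (fun v => clean (csplit v.toList)) := by
  induction vs generalizing out with
  | nil => simp
  | cons v vs' ih =>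
    simp only [List.foldl_cons, List.flatMap_cons]
    rw [dfa_spec v.toList [] [] out ⟨rfl, Or.inl ⟨rfl, rfl⟩⟩]
    simp only [List.nil_append, prepFirst_nil _ (csplit_ne_nil v.toList)]
    rw [ih, List.append_assoc]

-- ===== VERDICT (by name: the statement is the Claim_ definition above) =====
theorem parse_csv_tokens_spec : Claim_equal_parse_csv_tokens := by
  unfold Claim_equal_parse_csv_tokens Spec_parse_csv_tokens
  intro values _
  cases values with
  | none => rfl
  | some vs =>
    by_cases hvs : vs = []
    · simp [parse_csv_tokens, parse_csv_tokens_alt, hvs]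
    · simp only [parse_csv_tokens, parse_csv_tokens_alt, if_neg hvs]
      rw [outer_fold, outer_alt, List.nil_append, List.nil_append]
      exact List.flatMap_congr (fun v _ => a_value v)
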